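-- pv_equiv track=rewrite | github.com/Miguel235711/CompetitiveProgrammingAndMore | Competitive Programming 3/Section 1.4/Game (Chess)/255 - Correct Move/Python/main.py | getQPositions
-- ===== SOURCE A (Python) =====
-- movs=[1,-1,8,-8]
--
-- def colMov(a,b):
--     return a//8==b//8
--
-- def insideMap(p):
--     return -1<p and p < 64
--
-- def getQPositions(p):
--     ans=[p]
--     for mov in movs:
--         newP = p + mov
--         while (abs(mov)==8 and insideMap(newP)) or (abs(mov)==1 and colMov(newP,p)):
--             ans.append(newP)
--             newP+=mov
--     return ans
-- ===== SOURCE B (Python) =====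
-- def getQPositions(p):
--     row = p // 8
--
--     def right(q):
--         return [q] + right(q + 1) if q // 8 == row else []
--
--     def left(q):
--         return [q] + left(q - 1) if q // 8 == row else []
--
--     def down(q):
--         return [q] + down(q + 8) if 0 <= q < 64 else []
--
--     def up(q):
--         return [q] + up(q - 8) if 0 <= q < 64 else []
--
--     return [p] + right(p + 1) + left(p - 1) + down(p + 8) + up(p - 8)
-- ===== Notes on version B (the rewrite author's own statement) =====
-- stated objective: simpler
-- what changed: Replaces A's mov-table for loop, abs(mov) dispatch and append-accumulating while loops with four small named recursive ray builders (right/left/down/up) that each carry their own test and build their list by prepending on return; the result is the concatenation of [p] with the four rays.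
import Mathlib
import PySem

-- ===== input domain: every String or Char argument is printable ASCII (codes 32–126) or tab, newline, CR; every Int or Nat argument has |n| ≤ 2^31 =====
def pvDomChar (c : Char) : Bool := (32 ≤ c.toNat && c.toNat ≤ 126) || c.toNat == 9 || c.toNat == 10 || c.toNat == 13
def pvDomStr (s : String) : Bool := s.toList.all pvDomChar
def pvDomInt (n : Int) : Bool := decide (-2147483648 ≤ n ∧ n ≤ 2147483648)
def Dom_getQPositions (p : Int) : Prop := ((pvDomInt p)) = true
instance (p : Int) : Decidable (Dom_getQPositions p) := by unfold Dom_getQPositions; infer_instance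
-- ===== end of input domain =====

-- B replaces A's mov-table dispatch and append-accumulating while loops by four small
-- recursive ray builders that prepend as they return (objective: simpler).

-- ===== PORT A =====
def pvMovs : List Int := [1, -1, 8, -8]

def colMov (a b : Int) : Bool := PySem.Int.floordiv a 8 == PySem.Int.floordiv b 8

def insideMap (p : Int) : Bool := (-1 < p) && (p < 64)

-- cited by qWhile's termination proof, hence stated above the port
theorem colMov_iff (a b : Int) :
    colMov a b = true ↔
      (PySem.Int.floordiv b 8) * 8 ≤ a ∧ a < (PySem.Int.floordiv b 8) * 8 + 8 := by
  unfold colMov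
  rw [beq_iff_eq, PySem.Int.floordiv_eq_iff_of_pos (by decide : (0:Int) < 8),
      show (PySem.Int.floordiv b 8 + 1) * 8 = PySem.Int.floordiv b 8 * 8 + 8 from by ring]

-- the while loop of A, one call per direction `mov`; qWhile_dec (below) is its termination argument
theorem qWhile_dec (p mov newP : Int)
    (h : ((mov.natAbs == 8 && insideMap newP) || (mov.natAbs == 1 && colMov newP p)) = true) :
    (if 0 < mov then (max 64 (p + 9) - (newP + mov)).toNat
     else ((newP + mov) - min (-1) (p - 9)).toNat) <
    (if 0 < mov then (max 64 (p + 9) - newP).toNat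
     else (newP - min (-1) (p - 9)).toNat) := by
  rcases Bool.or_eq_true_iff.mp h with h' | h'
  · obtain ⟨h8, hin⟩ := Bool.and_eq_true_iff.mp h'
    simp only [insideMap, Bool.and_eq_true, decide_eq_true_eq] at hin
    obtain ⟨hlo, hhi⟩ := hin
    have hm : mov = 8 ∨ mov = -8 := by
      rcases Int.natAbs_eq_iff.mp (beq_iff_eq.mp h8) with hm | hm
      · exact Or.inl (by exact_mod_cast hm)
      · exact Or.inr (by exact_mod_cast hm)
    rcases hm with hm | hm <;> subst hm
    · rw [if_pos (by decide : (0:Int) < 8), if_pos (by decide : (0:Int) < 8)]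
      have hlt : newP < max 64 (p + 9) := lt_of_lt_of_le hhi (le_max_left _ _)
      rw [Int.toNat_lt_toNat (Int.sub_pos.mpr hlt)]
      exact Int.sub_lt_sub_left (lt_add_of_pos_right newP (by decide)) _
    · rw [if_neg (by decide : ¬ (0:Int) < -8), if_neg (by decide : ¬ (0:Int) < -8)]
      have hgt : min (-1 : Int) (p - 9) < newP := lt_of_le_of_lt (min_le_left _ _) hlo
      rw [Int.toNat_lt_toNat (Int.sub_pos.mpr hgt)]
      exact sub_lt_sub_right (add_lt_of_neg_right newP (by decide)) _
  · obtain ⟨h1, hcol⟩ := Bool.and_eq_true_iff.mp h'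
    have hb := (colMov_iff newP p).mp hcol
    have hp := (PySem.Int.floordiv_eq_iff_of_pos (by decide : (0:Int) < 8)).mp
      (rfl : PySem.Int.floordiv p 8 = PySem.Int.floordiv p 8)
    have hm : mov = 1 ∨ mov = -1 := by
      rcases Int.natAbs_eq_iff.mp (beq_iff_eq.mp h1) with hm | hm
      · exact Or.inl (by exact_mod_cast hm)
      · exact Or.inr (by exact_mod_cast hm)
    rcases hm with hm | hm <;> subst hm
    · rw [if_pos (by decide : (0:Int) < 1), if_pos (by decide : (0:Int) < 1)]
      have hlt : newP < max 64 (p + 9) :=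
        lt_of_lt_of_le (by linarith [hb.2, hp.1]) (le_max_right 64 (p + 9))
      rw [Int.toNat_lt_toNat (Int.sub_pos.mpr hlt)]
      exact Int.sub_lt_sub_left (lt_add_of_pos_right newP (by decide)) _
    · rw [if_neg (by decide : ¬ (0:Int) < -1), if_neg (by decide : ¬ (0:Int) < -1)]
      have hgt : min (-1 : Int) (p - 9) < newP :=
        lt_of_le_of_lt (min_le_right (-1) (p - 9)) (by linarith [hb.1, hp.2])
      rw [Int.toNat_lt_toNat (Int.sub_pos.mpr hgt)]
      exact sub_lt_sub_right (add_lt_of_neg_right newP (by decide)) _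

def qWhile (p mov newP : Int) (ans : List Int) : List Int :=
  if _h : ((mov.natAbs == 8 && insideMap newP) || (mov.natAbs == 1 && colMov newP p)) = true then
    qWhile p mov (newP + mov) (ans ++ [newP])
  else ans
termination_by (if 0 < mov then (max 64 (p + 9) - newP).toNat
                else (newP - min (-1) (p - 9)).toNat)
decreasing_by exact qWhile_dec p mov newP _h

def getQPositions (p : Int) : List Int :=
  pvMovs.foldl (fun ans mov => qWhile p mov (p + mov) ans) [p]

-- ===== PORT B =====
-- the _dec theorems are cited by the ray builders' termination proofs, hence stated above the port
theorem rayRight_dec (row q : Int) (h : (PySem.Int.floordiv q 8 == row) = true) :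
    (row * 8 + 8 - (q + 1)).toNat < (row * 8 + 8 - q).toNat := by
  have hb := (PySem.Int.floordiv_eq_iff_of_pos (by decide : (0:Int) < 8)).mp (beq_iff_eq.mp h)
  have hlt : q < row * 8 + 8 := lt_of_lt_of_eq hb.2 (by ring)
  rw [Int.toNat_lt_toNat (Int.sub_pos.mpr hlt)]
  exact Int.sub_lt_sub_left (lt_add_of_pos_right q (by decide)) _

def rayRight (row q : Int) : List Int :=
  if h : (PySem.Int.floordiv q 8 == row) = true then q :: rayRight row (q + 1) else []
termination_by (row * 8 + 8 - q).toNat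
decreasing_by exact rayRight_dec row q h

theorem rayLeft_dec (row q : Int) (h : (PySem.Int.floordiv q 8 == row) = true) :
    (q - 1 - (row * 8 - 1)).toNat < (q - (row * 8 - 1)).toNat := by
  have hb := (PySem.Int.floordiv_eq_iff_of_pos (by decide : (0:Int) < 8)).mp (beq_iff_eq.mp h)
  have hgt : row * 8 - 1 < q := lt_of_lt_of_le (sub_lt_self (row * 8) (by decide : (0:Int) < 1)) hb.1
  rw [Int.toNat_lt_toNat (Int.sub_pos.mpr hgt)]
  exact sub_lt_sub_right (sub_lt_self q (by decide : (0:Int) < 1)) _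

def rayLeft (row q : Int) : List Int :=
  if h : (PySem.Int.floordiv q 8 == row) = true then q :: rayLeft row (q - 1) else []
termination_by (q - (row * 8 - 1)).toNat
decreasing_by exact rayLeft_dec row q h

theorem rayDown_dec (q : Int) (h : (decide (0 ≤ q) && decide (q < 64)) = true) :
    (64 - (q + 8)).toNat < (64 - q).toNat := by
  have hlt : q < 64 := of_decide_eq_true (Bool.and_eq_true_iff.mp h).2
  rw [Int.toNat_lt_toNat (Int.sub_pos.mpr hlt)]
  exact Int.sub_lt_sub_left (lt_add_of_pos_right q (by decide)) _

def rayDown (q : Int) : List Int :=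
  if h : (decide (0 ≤ q) && decide (q < 64)) = true then q :: rayDown (q + 8) else []
termination_by (64 - q).toNat
decreasing_by exact rayDown_dec q h

theorem rayUp_dec (q : Int) (h : (decide (0 ≤ q) && decide (q < 64)) = true) :
    (q - 8 + 1).toNat < (q + 1).toNat := by
  have h0 : (0:Int) ≤ q := of_decide_eq_true (Bool.and_eq_true_iff.mp h).1
  rw [Int.toNat_lt_toNat (add_pos_of_nonneg_of_pos h0 (by decide : (0:Int) < 1))]
  exact Int.add_lt_add_right (sub_lt_self q (by decide : (0:Int) < 8)) 1

def rayUp (q : Int) : List Int :=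
  if h : (decide (0 ≤ q) && decide (q < 64)) = true then q :: rayUp (q - 8) else []
termination_by (q + 1).toNat
decreasing_by exact rayUp_dec q h

def getQPositions_alt (p : Int) : List Int :=
  let row := PySem.Int.floordiv p 8
  [p] ++ rayRight row (p + 1) ++ rayLeft row (p - 1) ++ rayDown (p + 8) ++ rayUp (p - 8)

-- ===== PRECONDITION & SPEC =====
def Spec_getQPositions (p : Int) (out : List Int) : Prop := out = getQPositions_alt p
instance (p : Int) (out : List Int) : Decidable (Spec_getQPositions p out) := by unfold Spec_getQPositions; infer_instance

-- ===== CLAIM (what is proved, stated in full; the proofs are below) =====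
def Claim_equal_getQPositions : Prop :=
  ∀ (p : Int), Dom_getQPositions p → Spec_getQPositions p (getQPositions p)

-- ===== LEMMAS AND PROOFS =====

theorem qWhile_stop (p mov s : Int) (ans : List Int)
    (hc : ((mov.natAbs == 8 && insideMap s) || (mov.natAbs == 1 && colMov s p)) = false) :
    qWhile p mov s ans = ans := by
  rw [qWhile]; simp [hc]

-- A's while loop with mov = 1 builds B's rightward ray behind the accumulator
theorem qWhile_one (p : Int) : ∀ (n : Nat) (s : Int) (ans : List Int),
    (max 64 (p + 9) - s).toNat ≤ n →
    qWhile p 1 s ans = ans ++ rayRight (PySem.Int.floordiv p 8) s := by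
  have hp := (PySem.Int.floordiv_eq_iff_of_pos (by decide : (0:Int) < 8)).mp
    (rfl : PySem.Int.floordiv p 8 = PySem.Int.floordiv p 8)
  intro n
  induction n with
  | zero =>
    intro s ans hle
    have hg : colMov s p = false := by
      rw [Bool.eq_false_iff]; intro hc
      have := (colMov_iff s p).mp hc
      omega
    rw [qWhile_stop p 1 s ans (by simp [hg]), rayRight, dif_neg (by simpa [colMov] using hg),
        List.append_nil]
  | succ n ih =>
    intro s ans hle
    by_cases hg : colMov s p = true
    · have hb := (colMov_iff s p).mp hg
      rw [qWhile, dif_pos (show (((1:Int).natAbs == 8 && insideMap s)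
            || ((1:Int).natAbs == 1 && colMov s p)) = true by simp [hg])]
      have hstep : rayRight (PySem.Int.floordiv p 8) s
          = s :: rayRight (PySem.Int.floordiv p 8) (s + 1) := by
        rw [rayRight, dif_pos (by simpa [colMov] using hg)]
      rw [ih (s + 1) (ans ++ [s]) (by omega), hstep]
      simp
    · rw [qWhile_stop p 1 s ans (by simp [Bool.eq_false_iff.mpr hg]),
          rayRight, dif_neg (by simpa [colMov] using Bool.eq_false_iff.mpr hg), List.append_nil]
  -- (the `simpa [colMov]` steps only re-read colMov's definition as rayRight's guard)

-- A's while loop with mov = -1 builds B's leftward ray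
theorem qWhile_neg_one (p : Int) : ∀ (n : Nat) (s : Int) (ans : List Int),
    (s - min (-1) (p - 9)).toNat ≤ n →
    qWhile p (-1) s ans = ans ++ rayLeft (PySem.Int.floordiv p 8) s := by
  have hp := (PySem.Int.floordiv_eq_iff_of_pos (by decide : (0:Int) < 8)).mp
    (rfl : PySem.Int.floordiv p 8 = PySem.Int.floordiv p 8)
  intro n
  induction n with
  | zero =>
    intro s ans hle
    have hg : colMov s p = false := by
      rw [Bool.eq_false_iff]; intro hc
      have := (colMov_iff s p).mp hc
      omega
    rw [qWhile_stop p (-1) s ans (by simp [hg]), rayLeft, dif_neg (by simpa [colMov] using hg),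
        List.append_nil]
  | succ n ih =>
    intro s ans hle
    by_cases hg : colMov s p = true
    · have hb := (colMov_iff s p).mp hg
      rw [qWhile, dif_pos (show ((((-1):Int).natAbs == 8 && insideMap s)
            || (((-1):Int).natAbs == 1 && colMov s p)) = true by simp [hg])]
      rw [show s + (-1) = s - 1 from by ring,
          ih (s - 1) (ans ++ [s]) (by omega),
          show rayLeft (PySem.Int.floordiv p 8) s
              = s :: rayLeft (PySem.Int.floordiv p 8) (s - 1) from by
            rw [rayLeft, dif_pos (by simpa [colMov] using hg)]]
      simp
    · rw [qWhile_stop p (-1) s ans (by simp [Bool.eq_false_iff.mpr hg]),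
          rayLeft, dif_neg (by simpa [colMov] using Bool.eq_false_iff.mpr hg), List.append_nil]

-- insideMap is B's board test
theorem insideMap_eq (s : Int) : insideMap s = (decide (0 ≤ s) && decide (s < 64)) := by
  have h1 : (-1 < s) = (0 ≤ s) := propext ⟨by omega, by omega⟩
  simp only [insideMap, h1]

-- A's while loop with mov = 8 builds B's downward ray
theorem qWhile_eight (p : Int) : ∀ (n : Nat) (s : Int) (ans : List Int),
    (64 - s).toNat ≤ n →
    qWhile p 8 s ans = ans ++ rayDown s := by
  intro n
  induction n with
  | zero =>
    intro s ans hle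
    have hg : insideMap s = false := by rw [insideMap_eq]; simp; omega
    rw [qWhile_stop p 8 s ans (by simp [hg]), rayDown,
        dif_neg (by rw [← insideMap_eq]; simp [hg]), List.append_nil]
  | succ n ih =>
    intro s ans hle
    by_cases hg : insideMap s = true
    · have hb : 0 ≤ s ∧ s < 64 := by
        have := hg; rw [insideMap_eq] at this; simpa using this
      rw [qWhile, dif_pos (show (((8:Int).natAbs == 8 && insideMap s)
            || ((8:Int).natAbs == 1 && colMov s p)) = true by simp [hg])]
      rw [ih (s + 8) (ans ++ [s]) (by omega),
          show rayDown s = s :: rayDown (s + 8) from by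
            rw [rayDown, dif_pos (by rw [← insideMap_eq]; exact hg)]]
      simp
    · rw [qWhile_stop p 8 s ans (by simp [Bool.eq_false_iff.mpr hg]),
          rayDown, dif_neg (by rw [← insideMap_eq]; simp [Bool.eq_false_iff.mpr hg]),
          List.append_nil]

-- A's while loop with mov = -8 builds B's upward ray
theorem qWhile_neg_eight (p : Int) : ∀ (n : Nat) (s : Int) (ans : List Int),
    (s + 1).toNat ≤ n →
    qWhile p (-8) s ans = ans ++ rayUp s := by
  intro n
  induction n with
  | zero =>
    intro s ans hle
    have hg : insideMap s = false := by rw [insideMap_eq]; simp; omega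
    rw [qWhile_stop p (-8) s ans (by simp [hg]), rayUp,
        dif_neg (by rw [← insideMap_eq]; simp [hg]), List.append_nil]
  | succ n ih =>
    intro s ans hle
    by_cases hg : insideMap s = true
    · have hb : 0 ≤ s ∧ s < 64 := by
        have := hg; rw [insideMap_eq] at this; simpa using this
      rw [qWhile, dif_pos (show ((((-8):Int).natAbs == 8 && insideMap s)
            || (((-8):Int).natAbs == 1 && colMov s p)) = true by simp [hg])]
      rw [show s + (-8) = s - 8 from by ring,
          ih (s - 8) (ans ++ [s]) (by omega),
          show rayUp s = s :: rayUp (s - 8) from by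
            rw [rayUp, dif_pos (by rw [← insideMap_eq]; exact hg)]]
      simp
    · rw [qWhile_stop p (-8) s ans (by simp [Bool.eq_false_iff.mpr hg]),
          rayUp, dif_neg (by rw [← insideMap_eq]; simp [Bool.eq_false_iff.mpr hg]),
          List.append_nil]

-- ===== VERDICT (by name: the statement is the Claim_ definition above) =====
theorem getQPositions_spec : Claim_equal_getQPositions := by
  intro p _
  unfold Spec_getQPositions getQPositions getQPositions_alt pvMovs
  simp only [List.foldl_cons, List.foldl_nil]
  rw [show p + (-1) = p - 1 from by ring, show p + (-8) = p - 8 from by ring]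
  rw [qWhile_one p (max 64 (p + 9) - (p + 1)).toNat (p + 1) [p] le_rfl]
  rw [qWhile_neg_one p ((p - 1) - min (-1) (p - 9)).toNat (p - 1) _ le_rfl]
  rw [qWhile_eight p (64 - (p + 8)).toNat (p + 8) _ le_rfl]
  rw [qWhile_neg_eight p ((p - 8) + 1).toNat (p - 8) _ le_rfl]
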